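-- pv_equiv track=rewrite | github.com/zhouyuchenzyccccc/ego_recovery_data_preprocessing | extract_wrist_pose.py | get_by_alias
-- ===== SOURCE A (Python) =====
-- def get_by_alias(mapping, aliases):
--     if not isinstance(mapping, dict):
--         return None
--     normalized = {str(k).lower(): v for k, v in mapping.items()}
--     for alias in aliases:
--         if alias.lower() in normalized:
--             return normalized[alias.lower()]
--     return None
-- ===== SOURCE B (Python) =====
-- def get_by_alias(mapping, aliases):
--     if not isinstance(mapping, dict):
--         return None
--     rank = {}
--     for i, a in enumerate(aliases):
--         al = a.lower()
--         if al not in rank: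
--             rank[al] = i
--     best_rank = None
--     best_val = None
--     for k, v in mapping.items():
--         r = rank.get(str(k).lower())
--         if r is not None and (best_rank is None or r <= best_rank):
--             best_rank = r
--             best_val = v
--     return best_val
-- ===== Notes on version B (the rewrite author's own statement) =====
-- stated objective: alternative
-- what changed: B inverts the traversal: it indexes the aliases once by their lowercase form and priority, then makes one pass over the mapping items keeping the item whose key matches the highest-priority (lowest-index) alias, later items winning ties, instead of A's lowercased-dict build followed by per-alias probing.
import Mathlib
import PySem

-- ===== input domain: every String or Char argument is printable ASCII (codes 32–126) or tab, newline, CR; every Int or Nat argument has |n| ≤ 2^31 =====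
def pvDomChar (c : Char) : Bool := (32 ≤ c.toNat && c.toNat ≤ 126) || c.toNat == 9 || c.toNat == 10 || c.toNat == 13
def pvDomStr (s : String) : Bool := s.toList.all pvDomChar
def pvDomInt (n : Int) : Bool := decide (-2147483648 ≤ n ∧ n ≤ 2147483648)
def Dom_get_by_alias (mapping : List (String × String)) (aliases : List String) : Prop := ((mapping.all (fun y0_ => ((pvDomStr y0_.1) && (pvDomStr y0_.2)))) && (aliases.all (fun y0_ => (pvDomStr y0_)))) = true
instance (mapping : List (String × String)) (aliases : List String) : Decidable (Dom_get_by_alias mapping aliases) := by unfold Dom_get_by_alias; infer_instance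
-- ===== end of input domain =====

-- B inverts the traversal: it ranks the aliases once, then selects the winner in a single pass
-- over the mapping items (lowest alias rank wins, later items win ties), instead of A's
-- lowercased-dict build followed by per-alias probing. Same cost; alternative structure.

-- ===== PORT A =====
-- the dict comprehension {str(k).lower(): v for k, v in mapping.items()}
def pvNormalized (mapping : List (String × String)) : PySem.Dict String String :=
  mapping.foldl (fun d p => d.insert (PySem.Str.lower p.1) p.2) PySem.Dict.empty

-- the 'for alias in aliases' loop of A
def pvLoopA (normalized : PySem.Dict String String) : List String → Option String
  | [] => none
  | a :: rest =>
      if normalized.contains (PySem.Str.lower a) then normalized.get? (PySem.Str.lower a)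
      else pvLoopA normalized rest

def get_by_alias (mapping : List (String × String)) (aliases : List String) : Option String :=
  pvLoopA (pvNormalized mapping) aliases

-- ===== PORT B =====
-- the 'for i, a in enumerate(aliases): if al not in rank: rank[al] = i' loop of B
def pvRankDict (aliases : List String) : PySem.Dict String Int :=
  (PySem.List.enumerate aliases).foldl
    (fun d p => if d.contains (PySem.Str.lower p.2) then d else d.insert (PySem.Str.lower p.2) p.1)
    PySem.Dict.empty

-- the body of B's 'for k, v in mapping.items()' loop
def pvBestStep (rank : PySem.Dict String Int) (best : Option (Int × String)) (p : String × String) :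
    Option (Int × String) :=
  match rank.get? (PySem.Str.lower p.1) with
  | none => best
  | some r =>
      match best with
      | none => some (r, p.2)
      | some (br, bv) => if r ≤ br then some (r, p.2) else some (br, bv)

def get_by_alias_alt (mapping : List (String × String)) (aliases : List String) : Option String :=
  (mapping.foldl (pvBestStep (pvRankDict aliases)) none).map (·.2)

-- ===== PRECONDITION & SPEC =====
def Spec_get_by_alias (mapping : List (String × String)) (aliases : List String) (out : Option String) : Prop := out = get_by_alias_alt mapping aliases
instance (mapping : List (String × String)) (aliases : List String) (out : Option String) : Decidable (Spec_get_by_alias mapping aliases out) := by unfold Spec_get_by_alias; infer_instance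

-- ===== CLAIM (what is proved, stated in full; the proofs are below) =====
def Claim_equal_get_by_alias : Prop := ∀ (mapping : List (String × String)) (aliases : List String), Dom_get_by_alias mapping aliases → Spec_get_by_alias mapping aliases (get_by_alias mapping aliases)

-- ===== LEMMAS AND PROOFS =====

-- reference: reverse scan of the items for one lowercased target (last inserted key wins)
def pvScanRev (items : List (String × String)) (target : String) : Option String :=
  (items.reverse.find? (fun p => PySem.Str.lower p.1 == target)).map (·.2)

-- reference: first alias with a matching key, value from pvScanRev
def pvRefLoop (items : List (String × String)) : List String → Option String
  | [] => none
  | a :: rest =>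
      match pvScanRev items (PySem.Str.lower a) with
      | some v => some v
      | none => pvRefLoop items rest

-- index (as Int) of the first alias whose lowercase form equals x
def pvFirstIdx (x : String) : List String → Option Int
  | [] => none
  | a :: t => if PySem.Str.lower a = x then some 0 else (pvFirstIdx x t).map (· + 1)

-- B's step with the rank dict replaced by pvFirstIdx
def pvStepS (aliases : List String) (best : Option (Int × String)) (p : String × String) :
    Option (Int × String) :=
  match pvFirstIdx (PySem.Str.lower p.1) aliases with
  | none => best
  | some r =>
      match best with
      | none => some (r, p.2)
      | some (br, bv) => if r ≤ br then some (r, p.2) else some (br, bv)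

-- ---------- A-side: last-wins insert loop = reverse scan ----------

lemma get?_foldl_insert_lower (l : List (String × String)) (d : PySem.Dict String String) (x : String) :
    (l.foldl (fun d p => d.insert (PySem.Str.lower p.1) p.2) d).get? x =
      match l.reverse.find? (fun p => PySem.Str.lower p.1 == x) with
      | some q => some q.2
      | none => d.get? x := by
  induction l generalizing d with
  | nil => simp
  | cons p t ih =>
      simp only [List.foldl_cons, List.reverse_cons, List.find?_append, ih]
      cases h : t.reverse.find? (fun p => PySem.Str.lower p.1 == x) with
      | some q => simp
      | none =>
          simp only [Option.none_or, List.find?_singleton]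
          by_cases hx : PySem.Str.lower p.1 = x
          · subst hx; simp [PySem.Dict.get?_insert_self]
          · simp [hx, PySem.Dict.get?_insert_of_ne _ _ (Ne.symm hx)]

lemma get?_normalized (mapping : List (String × String)) (x : String) :
    (pvNormalized mapping).get? x = pvScanRev mapping x := by
  rw [pvNormalized, get?_foldl_insert_lower, pvScanRev]
  cases h : mapping.reverse.find? (fun p => PySem.Str.lower p.1 == x) <;> simp

lemma loopA_eq_refLoop (mapping : List (String × String)) (aliases : List String) :
    pvLoopA (pvNormalized mapping) aliases = pvRefLoop mapping aliases := by
  induction aliases with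
  | nil => rfl
  | cons a rest ih =>
      simp only [pvLoopA, pvRefLoop, PySem.Dict.contains_eq_isSome_get?, get?_normalized, ih]
      cases h : pvScanRev mapping (PySem.Str.lower a) <;> simp

-- ---------- B-side: rank dict lookup = pvFirstIdx ----------

lemma get?_rank_fold (al : List String) (x : String) : ∀ (n : Int) (d : PySem.Dict String Int),
    ((PySem.List.enumerate al n).foldl
        (fun d p => if d.contains (PySem.Str.lower p.2) then d else d.insert (PySem.Str.lower p.2) p.1)
        d).get? x =
      match d.get? x with
      | some v => some v
      | none => (pvFirstIdx x al).map (· + n) := by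
  induction al with
  | nil => intro n d; simp [PySem.List.enumerate_nil, pvFirstIdx]; cases d.get? x <;> simp
  | cons a t ih =>
      intro n d
      rw [PySem.List.enumerate_cons, List.foldl_cons, ih]
      by_cases hc : d.contains (PySem.Str.lower a) = true
      · simp only [hc, if_pos]
        cases hd : d.get? x with
        | some v => simp
        | none =>
            have hax : PySem.Str.lower a ≠ x := by
              intro h; subst h
              rw [PySem.Dict.contains_eq_isSome_get?, hd] at hc; simp at hc
            simp only [pvFirstIdx, if_neg hax]
            cases pvFirstIdx x t with
            | none => simp
            | some i => simp; ring
      · simp only [hc, if_neg, Bool.not_eq_true]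
        by_cases hax : PySem.Str.lower a = x
        · subst hax
          rw [PySem.Dict.get?_insert_self]
          have hd : d.get? (PySem.Str.lower a) = none := by
            rw [PySem.Dict.contains_eq_isSome_get?] at hc
            cases h : d.get? (PySem.Str.lower a) <;> simp [h] at hc ⊢
          simp [hd, pvFirstIdx]
        · rw [PySem.Dict.get?_insert_of_ne _ _ (Ne.symm hax)]
          cases hd : d.get? x with
          | some v => simp
          | none =>
              simp only [pvFirstIdx, if_neg hax]
              cases pvFirstIdx x t with
              | none => simp
              | some i => simp; ring

lemma get?_rankDict (al : List String) (x : String) :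
    (pvRankDict al).get? x = pvFirstIdx x al := by
  rw [pvRankDict, get?_rank_fold al x 0 PySem.Dict.empty]
  simp only [PySem.Dict.get?_empty]
  cases pvFirstIdx x al <;> simp

lemma bestStep_eq_stepS (al : List String) :
    pvBestStep (pvRankDict al) = pvStepS al := by
  funext best p
  rw [pvBestStep, pvStepS, get?_rankDict]

-- ---------- fold characterization ----------

lemma firstIdx_nonneg (x : String) (al : List String) (r : Int) (h : pvFirstIdx x al = some r) :
    0 ≤ r := by
  induction al generalizing r with
  | nil => simp [pvFirstIdx] at h
  | cons a t ih =>
      rw [pvFirstIdx] at h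
      split at h
      · cases h; omega
      · cases hf : pvFirstIdx x t with
        | none => rw [hf] at h; simp at h
        | some r' => rw [hf] at h; simp at h; have := ih r' hf; omega

lemma scanRev_cons (p : String × String) (t : List (String × String)) (target : String) :
    pvScanRev (p :: t) target =
      match pvScanRev t target with
      | some v => some v
      | none => if PySem.Str.lower p.1 = target then some p.2 else none := by
  simp only [pvScanRev, List.reverse_cons, List.find?_append]
  cases h : t.reverse.find? (fun q => PySem.Str.lower q.1 == target) with
  | some q => simp
  | none =>
      simp only [Option.none_or, List.find?_singleton, Option.map_none]
      by_cases hx : PySem.Str.lower p.1 = target <;> simp [hx]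

lemma scanRev_eq_none_iff (t : List (String × String)) (target : String) :
    pvScanRev t target = none ↔ ∀ p ∈ t, PySem.Str.lower p.1 ≠ target := by
  simp only [pvScanRev, Option.map_eq_none_iff, List.find?_eq_none, List.mem_reverse]
  constructor
  · intro h p hp heq; exact absurd (beq_iff_eq.mpr heq) (by simpa using h p hp)
  · intro h p hp; simpa using h p hp

-- if no item matches alias a, the fold over (a :: rest) is the shifted fold over rest
lemma fold_shift (a : String) (rest : List String) :
    ∀ (m : List (String × String)) (s : Option (Int × String)),
      (∀ p ∈ m, PySem.Str.lower p.1 ≠ PySem.Str.lower a) →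
      m.foldl (pvStepS (a :: rest)) (s.map (fun q => (q.1 + 1, q.2))) =
        (m.foldl (pvStepS rest) s).map (fun q => (q.1 + 1, q.2)) := by
  intro m
  induction m with
  | nil => intro s _; simp
  | cons p t ih =>
      intro s hm
      have hpa : PySem.Str.lower p.1 ≠ PySem.Str.lower a := hm p (by simp)
      have ht : ∀ q ∈ t, PySem.Str.lower q.1 ≠ PySem.Str.lower a :=
        fun q hq => hm q (by simp [hq])
      simp only [List.foldl_cons]
      have hstep : pvStepS (a :: rest) (s.map (fun q => (q.1 + 1, q.2))) p =
          (pvStepS rest s p).map (fun q => (q.1 + 1, q.2)) := by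
        simp only [pvStepS, pvFirstIdx, if_neg (Ne.symm hpa)]
        cases hf : pvFirstIdx (PySem.Str.lower p.1) rest with
        | none => simp
        | some r =>
            cases s with
            | none => simp
            | some q =>
                simp only [Option.map_some]
                split_ifs with h1 h2 h2 <;> first | (exfalso; omega) | simp
      rw [hstep, ih (pvStepS rest s p) ht]

-- a state of rank 0 absorbs items that do not match alias a
lemma fold_zero_stable (a : String) (rest : List String) (v : String) :
    ∀ (t : List (String × String)),
      (∀ p ∈ t, PySem.Str.lower p.1 ≠ PySem.Str.lower a) →
      t.foldl (pvStepS (a :: rest)) (some (0, v)) = some (0, v) := by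
  intro t
  induction t with
  | nil => intro _; rfl
  | cons p t ih =>
      intro h
      have hpa : PySem.Str.lower p.1 ≠ PySem.Str.lower a := h p (by simp)
      have hstep : pvStepS (a :: rest) (some ((0 : Int), v)) p = some (0, v) := by
        simp only [pvStepS, pvFirstIdx, if_neg (Ne.symm hpa)]
        cases hf : pvFirstIdx (PySem.Str.lower p.1) rest with
        | none => rfl
        | some r =>
            have := firstIdx_nonneg _ _ _ hf
            simp only [Option.map_some]
            rw [if_neg (by omega)]
      simp only [List.foldl_cons, hstep]
      exact ih (fun q hq => h q (by simp [hq]))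

-- if some item matches alias a, the fold ends at rank 0 with the last matching value
lemma fold_zero_wins (a : String) (rest : List String) :
    ∀ (m : List (String × String)) (v : String) (s : Option (Int × String)),
      (∀ br bv, s = some (br, bv) → 0 ≤ br) →
      pvScanRev m (PySem.Str.lower a) = some v →
      m.foldl (pvStepS (a :: rest)) s = some (0, v) := by
  intro m
  induction m with
  | nil => intro v s _ hscan; simp [pvScanRev] at hscan
  | cons p t ih =>
      intro v s hs hscan
      rw [scanRev_cons] at hscan
      simp only [List.foldl_cons]
      cases hscan_t : pvScanRev t (PySem.Str.lower a) with
      | some w =>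
          rw [hscan_t] at hscan
          simp only at hscan
          injection hscan with hw
          subst hw
          apply ih w (pvStepS (a :: rest) s p) _ hscan_t
          intro br bv hsp
          rw [pvStepS] at hsp
          cases hf : pvFirstIdx (PySem.Str.lower p.1) (a :: rest) with
          | none => rw [hf] at hsp; exact hs br bv hsp
          | some r =>
              have hr := firstIdx_nonneg _ _ _ hf
              rw [hf] at hsp
              cases s with
              | none => simp at hsp; omega
              | some q =>
                  simp only at hsp
                  split at hsp <;> (cases hsp; first | omega | exact hs q.1 q.2 rfl)
      | none =>
          rw [hscan_t] at hscan
          simp only at hscan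
          have hmatch : PySem.Str.lower p.1 = PySem.Str.lower a := by
            by_contra hne; rw [if_neg hne] at hscan; cases hscan
          rw [if_pos hmatch] at hscan
          have hv : v = p.2 := by cases hscan; rfl
          subst hv
          have hstep : pvStepS (a :: rest) s p = some (0, p.2) := by
            simp only [pvStepS, pvFirstIdx, if_pos hmatch.symm]
            cases s with
            | none => rfl
            | some q =>
                have := hs q.1 q.2 (by simp)
                simp only
                rw [if_pos (by omega)]
          rw [hstep]
          exact fold_zero_stable a rest p.2 t ((scanRev_eq_none_iff t _).mp hscan_t)

lemma fold_empty_aliases : ∀ (m : List (String × String)),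
    m.foldl (pvStepS []) none = none := by
  intro m
  induction m with
  | nil => rfl
  | cons p t ih => simpa [List.foldl_cons, pvStepS, pvFirstIdx] using ih

lemma foldB_eq_refLoop (al : List String) (m : List (String × String)) :
    (m.foldl (pvStepS al) none).map (·.2) = pvRefLoop m al := by
  induction al generalizing m with
  | nil => rw [fold_empty_aliases]; rfl
  | cons a rest ih =>
      rw [pvRefLoop]
      cases hscan : pvScanRev m (PySem.Str.lower a) with
      | some v => rw [fold_zero_wins a rest m v none (by intro _ _ h; cases h) hscan]; rfl
      | none =>
          have hnone : ∀ p ∈ m, PySem.Str.lower p.1 ≠ PySem.Str.lower a :=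
            (scanRev_eq_none_iff m _).mp hscan
          have := fold_shift a rest m none hnone
          simp only [Option.map_none] at this
          rw [this, ← ih m]
          cases m.foldl (pvStepS rest) none <;> rfl

-- ===== VERDICT (by name: the statement is the Claim_ definition above) =====
theorem get_by_alias_spec : Claim_equal_get_by_alias := by
  intro mapping aliases _
  show get_by_alias mapping aliases = get_by_alias_alt mapping aliases
  rw [get_by_alias, get_by_alias_alt, bestStep_eq_stepS, loopA_eq_refLoop, foldB_eq_refLoop]
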